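-- pv_equiv track=rewrite | github.com/Github-SG03/Python-Masterclass | practise/python_program_list_intermediate/CorrectPath.py | is_valid_path
-- ===== SOURCE A (Python) =====
-- def is_valid_path(path):
--     """Check if the given path leads from (0,0) to (4,4) without revisiting."""
--     visited = set()
--     x, y = 0, 0
--     visited.add((x, y))
--
--     for move in path:
--         if move == 'r': x += 1
--         elif move == 'l': x -= 1
--         elif move == 'u': y -= 1
--         elif move == 'd': y += 1
--
--         # If out of bounds or revisiting a cell, return False
--         if x < 0 or x > 4 or y < 0 or y > 4 or (x, y) in visited:
--             return False
--
--         visited.add((x, y))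
--
--     return (x, y) == (4, 4)  # Must end at bottom-right corner
-- ===== SOURCE B (Python) =====
-- def is_valid_path(path):
--     """Check if the given path leads from (0,0) to (4,4) without revisiting."""
--     delta = {'r': (1, 0), 'l': (-1, 0), 'u': (0, -1), 'd': (0, 1)}
--     x, y = 0, 0
--     positions = [(0, 0)]
--     for move in path:
--         dx, dy = delta.get(move, (0, 0))
--         x += dx
--         y += dy
--         positions.append((x, y))
--     in_bounds = all(0 <= a <= 4 and 0 <= b <= 4 for a, b in positions)
--     no_revisit = len(set(positions)) == len(positions)
--     ends_at_goal = (x, y) == (4, 4)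
--     return in_bounds and no_revisit and ends_at_goal
-- ===== Notes on version B (the rewrite author's own statement) =====
-- stated objective: alternative
-- what changed: A's single early-exit scan with a running visited set is replaced by building the full position trajectory first and then verifying three independent properties: all positions in bounds, no duplicates via len(set(...)), and endpoint (4,4).
import Mathlib
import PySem

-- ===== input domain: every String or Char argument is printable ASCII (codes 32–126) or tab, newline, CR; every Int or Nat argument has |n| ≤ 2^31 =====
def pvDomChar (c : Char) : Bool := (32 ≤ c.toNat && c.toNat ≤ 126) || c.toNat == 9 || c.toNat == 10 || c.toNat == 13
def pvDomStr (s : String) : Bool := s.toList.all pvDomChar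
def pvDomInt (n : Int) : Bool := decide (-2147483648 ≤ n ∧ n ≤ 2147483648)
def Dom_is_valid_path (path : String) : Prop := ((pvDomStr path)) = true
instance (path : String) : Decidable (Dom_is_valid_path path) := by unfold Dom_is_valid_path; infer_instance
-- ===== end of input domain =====

-- B replaces A's single early-exit scan by a build-the-whole-trajectory pass followed by three
-- independent verification checks (bounds, distinctness via set, endpoint); objective: alternative decomposition.

-- ===== PORT A =====
-- A's early-exit loop: visited set, current (x, y), branch chain on the move character.
def pvALoop (visited : PySem.Set (Int × Int)) (x y : Int) : List Char → Bool
  | [] => (x, y) == ((4 : Int), (4 : Int))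
  | c :: rest =>
    let p : Int × Int :=
      if c = 'r' then (x + 1, y)
      else if c = 'l' then (x - 1, y)
      else if c = 'u' then (x, y - 1)
      else if c = 'd' then (x, y + 1)
      else (x, y)
    if p.1 < 0 || p.1 > 4 || p.2 < 0 || p.2 > 4 || visited.contains p then false
    else pvALoop (visited.add p) p.1 p.2 rest

def is_valid_path (path : String) : Bool :=
  pvALoop (PySem.Set.add PySem.Set.empty ((0 : Int), (0 : Int))) 0 0 path.toList

-- ===== PORT B =====
-- the delta dict of Source B
def pvDelta : PySem.Dict Char (Int × Int) :=
  PySem.Dict.ofList [('r', (1, 0)), ('l', (-1, 0)), ('u', (0, -1)), ('d', (0, 1))]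

-- Source B's trajectory-building loop: returns (positions appended after the start, final x, final y)
def pvBBuild (x y : Int) : List Char → List (Int × Int) × Int × Int
  | [] => ([], x, y)
  | c :: rest =>
    let d := pvDelta.getD c (0, 0)
    let x' := x + d.1
    let y' := y + d.2
    let r := pvBBuild x' y' rest
    ((x', y') :: r.1, r.2)

def pvInBounds (p : Int × Int) : Bool :=
  decide (0 ≤ p.1) && decide (p.1 ≤ 4) && decide (0 ≤ p.2) && decide (p.2 ≤ 4)

def is_valid_path_alt (path : String) : Bool :=
  let r := pvBBuild 0 0 path.toList
  let positions := ((0 : Int), (0 : Int)) :: r.1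
  let in_bounds := positions.all pvInBounds
  let no_revisit := (PySem.Set.ofList positions).length == positions.length
  let ends_at_goal := r.2 == ((4 : Int), (4 : Int))
  in_bounds && no_revisit && ends_at_goal

-- ===== PRECONDITION & SPEC =====
def Spec_is_valid_path (path : String) (out : Bool) : Prop := out = is_valid_path_alt path
instance (path : String) (out : Bool) : Decidable (Spec_is_valid_path path out) := by unfold Spec_is_valid_path; infer_instance

-- ===== CLAIM (what is proved, stated in full; the proofs are below) =====
def Claim_equal_is_valid_path : Prop := ∀ (path : String), Dom_is_valid_path path → Spec_is_valid_path path (is_valid_path path)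

-- ===== LEMMAS AND PROOFS =====

-- A's branch chain computes the same step as B's delta-dict lookup.
theorem pvStep_eq (x y : Int) (c : Char) :
    (if c = 'r' then (x + 1, y)
     else if c = 'l' then (x - 1, y)
     else if c = 'u' then (x, y - 1)
     else if c = 'd' then (x, y + 1)
     else (x, y)) = (x + (pvDelta.getD c (0, 0)).1, y + (pvDelta.getD c (0, 0)).2) := by
  split_ifs with h1 h2 h3 h4
  · subst h1
    have h : pvDelta.getD 'r' (0, 0) = (1, 0) := by decide
    simp [h]
  · subst h2
    have h : pvDelta.getD 'l' (0, 0) = (-1, 0) := by decide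
    simp [h]; ring
  · subst h3
    have h : pvDelta.getD 'u' (0, 0) = (0, -1) := by decide
    simp [h]; ring
  · subst h4
    have h : pvDelta.getD 'd' (0, 0) = (0, 1) := by decide
    simp [h]
  · have h : pvDelta.getD c (0, 0) = (0, 0) := by
      have hmk : pvDelta = PySem.Dict.mk [('r', (1, 0)), ('l', (-1, 0)), ('u', (0, -1)), ('d', (0, 1))] := by rfl
      rw [hmk]
      simp [PySem.Dict.getD, Ne.symm h1, Ne.symm h2, Ne.symm h3, Ne.symm h4, PySem.Dict.get?]
    simp [h]

-- len(set(l)) == len(l) is exactly Nodup.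
theorem pvOfList_length_eq_iff_nodup (l : List (Int × Int)) :
    (PySem.Set.ofList l).length = l.length ↔ l.Nodup := by
  have hperm : (PySem.Set.ofList l).Perm l.dedup :=
    (List.perm_ext_iff_of_nodup (PySem.Set.nodup_ofList l) l.nodup_dedup).mpr
      (fun p => by simp [PySem.Set.mem_ofList, List.mem_dedup])
  rw [hperm.length_eq]
  constructor
  · intro h; exact List.dedup_eq_self.mp (l.dedup_sublist.eq_of_length h)
  · intro h; rw [List.dedup_eq_self.mpr h]

-- Invariant: A's early-exit loop succeeds iff the whole remaining trajectory is in bounds,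
-- visited ++ trajectory has no duplicates, and the final position is (4,4).
theorem pvALoop_iff (cs : List Char) : ∀ (x y : Int) (vis : PySem.Set (Int × Int)),
    vis.Nodup →
    (pvALoop vis x y cs = true ↔
      ((pvBBuild x y cs).1.all pvInBounds = true ∧
       (vis ++ (pvBBuild x y cs).1).Nodup ∧
       (pvBBuild x y cs).2 = ((4 : Int), (4 : Int)))) := by
  induction cs with
  | nil =>
    intro x y vis hnd
    simp [pvALoop, pvBBuild, hnd, Prod.ext_iff]
  | cons c rest ih =>
    intro x y vis hnd
    rw [pvALoop, pvBBuild]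
    rw [pvStep_eq x y c]
    set d := pvDelta.getD c (0, 0) with hd
    set p : Int × Int := (x + d.1, y + d.2) with hp
    by_cases hbad : (p.1 < 0 || p.1 > 4 || p.2 < 0 || p.2 > 4 || vis.contains p) = true
    · simp only [hbad, if_true]
      constructor
      · intro h; exact absurd h (by simp)
      · rintro ⟨hall, hnodup, -⟩
        exfalso
        simp only [Bool.or_eq_true, decide_eq_true_eq, PySem.Set.contains,
          List.contains_iff_mem] at hbad
        simp only [List.all_cons, Bool.and_eq_true, pvInBounds, decide_eq_true_eq] at hall
        rcases hbad with ((((h | h) | h) | h) | h)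
        · omega
        · omega
        · omega
        · omega
        · -- p ∈ vis but vis ++ p :: … must be nodup
          exact (List.nodup_append.mp hnodup).2.2 p h p (List.mem_cons_self ..) rfl
    · simp only [Bool.not_eq_true] at hbad
      simp only [hbad, Bool.false_eq_true, if_false]
      have hmem : p ∉ vis := by
        intro hm
        have : vis.contains p = true := by
          simp [PySem.Set.contains, hm]
        rw [this] at hbad
        simp at hbad
      have hadd : vis.add p = vis ++ [p] := by
        have : vis.contains p = false := by
          rw [Bool.eq_false_iff]
          intro hc
          exact hmem (by simpa [PySem.Set.contains] using hc)
        rw [PySem.Set.add, this]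
        simp
      have hnd' : (vis.add p).Nodup := by
        rw [hadd, List.nodup_append]
        refine ⟨hnd, by simp, ?_⟩
        intro q hq b hb he
        simp only [List.mem_singleton] at hb
        exact hmem (hb ▸ he ▸ hq)
      rw [ih p.1 p.2 (vis.add p) hnd', hadd]
      simp only [Bool.or_eq_false_iff, decide_eq_false_iff_not, not_lt] at hbad
      have hinp : pvInBounds p = true := by
        simp only [pvInBounds, Bool.and_eq_true, decide_eq_true_eq]
        exact ⟨⟨⟨hbad.1.1.1.1, hbad.1.1.1.2⟩, hbad.1.1.2⟩, hbad.1.2⟩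
      rw [List.append_assoc]
      simp only [List.all_cons, Bool.and_eq_true, hinp, true_and, List.cons_append,
        List.nil_append]
      exact Iff.rfl

-- B's three checks, rephrased through the same trajectory data.
theorem pvAlt_iff (path : String) :
    (is_valid_path_alt path = true ↔
      ((pvBBuild 0 0 path.toList).1.all pvInBounds = true ∧
       (((0 : Int), (0 : Int)) :: (pvBBuild 0 0 path.toList).1).Nodup ∧
       (pvBBuild 0 0 path.toList).2 = ((4 : Int), (4 : Int)))) := by
  unfold is_valid_path_alt
  simp only [Bool.and_eq_true, beq_iff_eq, List.all_cons]
  rw [pvOfList_length_eq_iff_nodup]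
  have h0 : pvInBounds ((0 : Int), (0 : Int)) = true := by decide
  rw [h0]
  simp [and_assoc]

-- ===== VERDICT (by name: the statement is the Claim_ definition above) =====
theorem is_valid_path_spec : Claim_equal_is_valid_path := by
  intro path _
  unfold Spec_is_valid_path
  have hvis : (PySem.Set.add PySem.Set.empty ((0 : Int), (0 : Int))) = [((0 : Int), (0 : Int))] := by
    decide
  rw [Bool.eq_iff_iff, pvAlt_iff]
  unfold is_valid_path
  rw [hvis, pvALoop_iff path.toList 0 0 [((0 : Int), (0 : Int))] (by decide)]
  simp
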